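-- pv_equiv track=rewrite | github.com/girishgupta211-zz/algorithms | find_summer_temparature.py | solution
-- ===== SOURCE A (Python) =====
-- def solution(arr):
--     left_max = maximum = arr[0]
--     position = 1  # there is always one day of winter
--
--     for i in range(1, len(arr) - 1):
--         if arr[i] < left_max:
--             position = i + 1
--             left_max = maximum
--         elif arr[i] > maximum:
--             maximum = arr[i]
--     return position
-- ===== SOURCE B (Python) =====
-- def solution(arr):
--     # Two-pass reformulation: running maxima vs suffix minima of the scanned body.
--     n = len(arr)
--     if n <= 2:
--         return 1
--     body = arr[1:n - 1]
--     # suffix minima of body: smin[j] = min(body[j:])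
--     smin = []
--     m = None
--     for x in reversed(body):
--         m = x if m is None else min(m, x)
--         smin.append(m)
--     smin.reverse()
--     # smallest position p whose prefix maximum fits under the remaining body
--     pmax = arr[0]
--     p = 1
--     for x, s in zip(body, smin):
--         if pmax <= s:
--             return p
--         pmax = max(pmax, x)
--         p += 1
--     return p
-- ===== Notes on version B (the rewrite author's own statement) =====
-- stated objective: alternative
-- what changed: Replaced A's single greedy scan with a lagging left_max/maximum state pair by two shaped passes: a suffix-minima array over the scanned body, then a forward prefix-maximum scan returning the first position whose prefix max fits under the remaining body.
-- outside the precondition, e.g. on solution([]): A raises IndexError, B returns 1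
import Mathlib
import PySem

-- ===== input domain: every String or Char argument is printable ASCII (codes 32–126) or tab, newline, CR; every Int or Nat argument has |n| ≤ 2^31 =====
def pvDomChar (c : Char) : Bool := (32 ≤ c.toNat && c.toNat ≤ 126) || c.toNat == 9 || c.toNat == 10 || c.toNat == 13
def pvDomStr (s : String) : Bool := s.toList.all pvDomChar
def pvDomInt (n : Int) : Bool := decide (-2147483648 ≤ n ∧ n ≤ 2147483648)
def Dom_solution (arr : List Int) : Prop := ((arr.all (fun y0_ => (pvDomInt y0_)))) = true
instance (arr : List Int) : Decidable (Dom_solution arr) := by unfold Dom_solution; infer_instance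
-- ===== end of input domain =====

-- B replaces A's single greedy scan (lagging left_max/maximum pair) by a suffix-minima pass plus a
-- forward prefix-maximum scan returning the first fitting position; same O(n) cost (objective: alternative).


-- ===== PORT A =====
-- one loop step of A: state (left_max, maximum, position), loop variable i
def aStep (arr : List Int) (st : Int × Int × Int) (i : Int) : Int × Int × Int :=
  let a := PySem.List.pyGetD arr i 0   -- arr[i]; i ∈ [1, n-2] is always in range
  if a < st.1 then (st.2.1, st.2.1, i + 1)
  else if a > st.2.1 then (st.1, a, st.2.2)
  else st

def solution (arr : List Int) : Int :=
  let n : Int := arr.length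
  -- left_max = maximum = arr[0] (IndexError on []: Pre_ excludes the empty list), position = 1
  let init : Int × Int × Int := (arr.headD 0, arr.headD 0, 1)
  ((PySem.List.pyRange 1 (n - 1) 1).foldl (aStep arr) init).2.2

-- ===== PORT B =====
-- reversed-loop body building the suffix minima (m is None before the first element)
def bSufMinStep (s : List Int × Option Int) (x : Int) : List Int × Option Int :=
  let m := match s.2 with | none => x | some m0 => min m0 x
  (s.1 ++ [m], some m)

-- the forward scan with early return, over zip(body, smin) with position counter p
def bScan : Int → Int → List (Int × Int) → Int
  | _, p, [] => p
  | pmax, p, (x, s) :: rest => if pmax ≤ s then p else bScan (max pmax x) (p + 1) rest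

def solution_alt (arr : List Int) : Int :=
  let n : Int := arr.length
  if n ≤ 2 then 1
  else
    let body := PySem.List.slice arr (some 1) (some (n - 1))   -- arr[1:n-1]
    let smin := (body.reverse.foldl bSufMinStep ([], none)).1.reverse
    bScan (arr.headD 0) 1 (body.zip smin)   -- arr[0]; n ≥ 3, so arr is nonempty

-- ===== PRECONDITION & SPEC =====
-- Pre_ excludes only the empty list, on which A raises IndexError reading the first element.
def Pre_solution (arr : List Int) : Prop := arr ≠ []
instance (arr : List Int) : Decidable (Pre_solution arr) := by unfold Pre_solution; infer_instance
def pvWitness_solution : List Int := ([1, 2, 3] : List Int)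

def Spec_solution (arr : List Int) (out : Int) : Prop := out = solution_alt arr
instance (arr : List Int) (out : Int) : Decidable (Spec_solution arr out) := by unfold Spec_solution; infer_instance

-- ===== CLAIM (what is proved, stated in full; the proofs are below) =====
def Claim_equal_solution : Prop := ∀ (arr : List Int), Dom_solution arr → Pre_solution arr → Spec_solution arr (solution arr)

-- ===== LEMMAS AND PROOFS =====

-- A's loop as structural recursion over the body list; q is the position the loop variable would record (i+1)
def fA : Int → Int → Int → Int → List Int → Int
  | _, _, P, _, [] => P
  | L, M, P, q, x :: xs =>
    if x < L then fA M M q (q + 1) xs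
    else if x > M then fA L x P (q + 1) xs
    else fA L M P (q + 1) xs

-- mathematical suffix-minima list: sufMins l = [min l[j:] | j]
def sufMins : List Int → List Int
  | [] => []
  | x :: xs => (xs.foldl min x) :: sufMins xs

-- B's scan, mathematically: first position p whose prefix max fits under the whole remaining body
def gB : Int → Int → List Int → Int
  | _, p, [] => p
  | pm, p, x :: xs => if pm ≤ xs.foldl min x then p else gB (max pm x) (p + 1) xs

theorem foldl_min_seed (xs : List Int) : ∀ (w x : Int), xs.foldl min (min w x) = min w (xs.foldl min x) := by
  induction xs with
  | nil => intro w x; rfl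
  | cons y ys ih =>
    intro w x
    simp only [List.foldl_cons]
    rw [min_assoc, ih]

theorem build_eq_sufMins (xs : List Int) : ∀ (x : Int),
    ((x :: xs).reverse.foldl bSufMinStep ([], none)) = ((sufMins (x :: xs)).reverse, some (xs.foldl min x)) := by
  induction xs with
  | nil => intro x; rfl
  | cons y ys ih =>
    intro x
    have h : (x :: y :: ys).reverse = (y :: ys).reverse ++ [x] := by simp
    rw [h, List.foldl_append, ih y]
    simp only [List.foldl_cons, sufMins, bSufMinStep]
    rw [foldl_min_seed]
    simp [min_comm]

theorem bScan_eq_gB (body : List Int) : ∀ (pm p : Int),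
    bScan pm p (body.zip (sufMins body)) = gB pm p body := by
  induction body with
  | nil => intro pm p; rfl
  | cons x xs ih =>
    intro pm p
    simp only [sufMins, List.zip_cons_cons, bScan, gB]
    split
    · rfl
    · exact ih _ _

theorem gB_stop (xs : List Int) : ∀ (pm p : Int), (∀ x ∈ xs, pm ≤ x) → gB pm p xs = p := by
  intro pm p h
  cases xs with
  | nil => rfl
  | cons x xs =>
    simp only [gB]
    have hm : pm ≤ xs.foldl min x := by
      rcases PySem.List.foldl_min_mem xs x with hc | hc
      · rw [hc]; exact h x (by simp)
      · exact h _ (by simp [hc])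
    simp [hm]

theorem gB_not_head (pm p x : Int) (xs : List Int) (h : ¬ pm ≤ xs.foldl min x) :
    gB pm p (x :: xs) = gB (max pm x) (p + 1) xs := by
  simp [gB, h]

theorem bridge (body : List Int) : ∀ (L M P q : Int), L ≤ M →
    fA L M P q body = if (∀ x ∈ body, L ≤ x) then P else gB M (q - 1) body := by
  induction body with
  | nil => intro L M P q _; simp [fA]
  | cons x xs ih =>
    intro L M P q hLM
    by_cases hall : ∀ y ∈ x :: xs, L ≤ y
    · -- no element ever drops below L: no update, fA keeps P
      rw [if_pos hall]
      have hx : L ≤ x := hall x (by simp)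
      have hxs : ∀ y ∈ xs, L ≤ y := fun y hy => hall y (by simp [hy])
      simp only [fA, if_neg (not_lt.mpr hx)]
      split
      · next hgt => rw [ih L x P (q + 1) (le_of_lt (lt_of_le_of_lt hLM hgt)), if_pos hxs]
      · rw [ih L M P (q + 1) hLM, if_pos hxs]
    · rw [if_neg hall]
      simp only [fA]
      -- some element of x :: xs is below L ≤ M, so the suffix-min test at position q-1 fails
      by_cases hx : x < L
      · -- update: position q, left_max := M
        have hfail : ¬ (M ≤ xs.foldl min x) := by
          have h1 : xs.foldl min x ≤ x := (PySem.List.foldl_min_le xs x).1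
          omega
        rw [gB_not_head M (q - 1) x xs hfail]
        have hmax : max M x = M := max_eq_left (by omega)
        rw [hmax]
        have h1 : q - 1 + 1 = q := by omega
        rw [h1, ih M M q (q + 1) le_rfl]
        have h2 : q + 1 - 1 = q := by omega
        rw [h2]
        by_cases hx2 : ∀ y ∈ xs, M ≤ y
        · rw [if_pos hx2, gB_stop xs M q hx2]; simp [hx]
        · rw [if_neg hx2]; simp [hx]
      · -- no update at the head; some later element is below L
        have hx' : L ≤ x := by omega
        have hexy : ∃ y ∈ xs, y < L := by
          by_contra hno
          apply hall
          intro y hy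
          rcases List.mem_cons.mp hy with h | h
          · omega
          · by_contra hyL
            exact hno ⟨y, h, by omega⟩
        have hxsall : ¬ ∀ y ∈ xs, L ≤ y := by
          rcases hexy with ⟨y, hy, hylt⟩
          intro hc; have := hc y hy; omega
        rw [if_neg (not_lt.mpr hx')]
        have hfail : ∀ (M' : Int), M ≤ M' → ¬ (M' ≤ xs.foldl min x) := by
          intro M' hMM'
          rcases hexy with ⟨y, hy, hylt⟩
          have h2 : xs.foldl min x ≤ y := (PySem.List.foldl_min_le xs x).2 y hy
          omega
        split
        · next hgt =>
          have hMx : L ≤ x := hx'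
          rw [ih L x P (q + 1) (by omega), if_neg hxsall,
              gB_not_head M (q - 1) x xs (hfail M le_rfl)]
          have hmax : max M x = x := max_eq_right (by omega)
          rw [hmax]
          congr 1
          omega
        · next hle =>
          rw [ih L M P (q + 1) hLM, if_neg hxsall,
              gB_not_head M (q - 1) x xs (hfail M le_rfl)]
          have hmax : max M x = M := max_eq_left (by omega)
          rw [hmax]
          congr 1
          omega

theorem foldA (bs : List Int) : ∀ (arr : List Int) (i : Nat) (st : Int × Int × Int),
    (∀ (k : Nat), (hk : k < bs.length) → PySem.List.pyGetD arr ((i : Int) + (k : Int)) 0 = bs[k]) →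
    ((PySem.List.pyRange (i : Int) ((i : Int) + (bs.length : Int)) 1).foldl (aStep arr) st).2.2
      = fA st.1 st.2.1 st.2.2 ((i : Int) + 1) bs := by
  induction bs with
  | nil => intro arr i st _; simp [PySem.List.pyRange_one_eq_nil, fA]
  | cons x xs ih =>
    intro arr i st hbs
    have hlen : ((i : Int)) < (i : Int) + ((x :: xs).length : Int) := by
      simp only [List.length_cons]; push_cast; omega
    rw [PySem.List.pyRange_one_cons hlen]
    simp only [List.foldl_cons]
    have hx : PySem.List.pyGetD arr (i : Int) 0 = x := by
      have := hbs 0 (by simp)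
      simpa using this
    have hstep : aStep arr st (i : Int) =
        if x < st.1 then (st.2.1, st.2.1, (i : Int) + 1)
        else if x > st.2.1 then (st.1, x, st.2.2) else st := by
      simp [aStep, hx]
    have hshift : ∀ (k : Nat), (hk : k < xs.length) →
        PySem.List.pyGetD arr (((i + 1 : Nat) : Int) + (k : Int)) 0 = xs[k] := by
      intro k hk
      have := hbs (k + 1) (by simpa using Nat.succ_lt_succ hk)
      have harg : ((i : Int) + ((k + 1 : Nat) : Int)) = (((i + 1 : Nat) : Int) + (k : Int)) := by push_cast; omega
      rw [harg] at this
      simpa using this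
    have hrange : ((i : Int) + 1) = ((i + 1 : Nat) : Int) := by push_cast; omega
    have hend : ((i : Int) + ((x :: xs).length : Int)) = (((i + 1 : Nat) : Int) + (xs.length : Int)) := by
      simp only [List.length_cons]; push_cast; omega
    rw [hstep]
    by_cases h1 : x < st.1
    · rw [if_pos h1]
      simp only [fA, if_pos h1]
      rw [hend, hrange]
      exact ih arr (i + 1) (st.2.1, st.2.1, ((i + 1 : Nat) : Int)) hshift
    · rw [if_neg h1]
      by_cases h2 : x > st.2.1
      · rw [if_pos h2]
        simp only [fA, if_neg h1, if_pos h2]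
        rw [hend, hrange]
        exact ih arr (i + 1) (st.1, x, st.2.2) hshift
      · rw [if_neg h2]
        simp only [fA, if_neg h1, if_neg h2]
        rw [hend, hrange]
        exact ih arr (i + 1) st hshift

-- ===== VERDICT (by name: the statement is the Claim_ definition above) =====
theorem solution_spec : Claim_equal_solution := by
  intro arr _ hpre
  unfold Spec_solution
  cases arr with
  | nil => exact absurd rfl hpre
  | cons a rest =>
    simp only [solution, solution_alt]
    have hslice : PySem.List.slice (a :: rest) (some 1) (some ((((a :: rest).length : Int)) - 1))
        = rest.take (rest.length - 1) := by
      have h2 : (((a :: rest).length : Int) - 1) = ((rest.length : Nat) : Int) := by simp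
      rw [h2]
      rw [show (some (1 : Int)) = some ((1 : Nat) : Int) by norm_num]
      rw [PySem.List.slice_natCast]
      simp
    by_cases hsmall : (((a :: rest).length : Int)) ≤ 2
    · rw [if_pos hsmall]
      have hnil : PySem.List.pyRange 1 ((((a :: rest).length : Int)) - 1) 1 = [] :=
        PySem.List.pyRange_one_eq_nil (by omega)
      rw [hnil]
      rfl
    · rw [if_neg hsmall]
      have hrl : 2 ≤ rest.length := by
        simp only [List.length_cons] at hsmall; push_cast at hsmall; omega
      have hblen : (rest.take (rest.length - 1)).length = rest.length - 1 := by
        simp [List.length_take]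
      have hbs : ∀ (k : Nat), (hk : k < (rest.take (rest.length - 1)).length) →
          PySem.List.pyGetD (a :: rest) (((1 : Nat) : Int) + (k : Int)) 0
            = (rest.take (rest.length - 1))[k] := by
        intro k hk
        have hk' : k < rest.length - 1 := by rw [hblen] at hk; exact hk
        have harg : (((1 : Nat) : Int) + (k : Int)) = (((k + 1 : Nat)) : Int) := by push_cast; ring
        rw [harg, PySem.List.pyGetD_natCast]
        have hkr : k < rest.length := by omega
        simp [List.getD_eq_getElem?_getD, hkr]
      have hA := foldA (rest.take (rest.length - 1)) (a :: rest) 1 (a, a, 1) hbs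
      norm_num at hA
      have hend : ((((a :: rest).length : Int)) - 1) = 1 + ((rest.take (rest.length - 1)).length : Int) := by
        rw [hblen]; simp; omega
      rw [hslice, hend]
      simp only [List.headD_cons]
      rw [hblen, hA]
      -- B side: identify the built list with sufMins, then the zip scan with gB
      cases hb : rest.take (rest.length - 1) with
      | nil => rw [hb] at hblen; simp at hblen; omega
      | cons b bt =>
        rw [build_eq_sufMins bt b]
        simp only [List.reverse_reverse]
        rw [bScan_eq_gB]
        have hbr := bridge (b :: bt) a a 1 2 le_rfl
        norm_num at hbr
        rw [hbr]
        by_cases hall : a ≤ b ∧ ∀ x ∈ bt, a ≤ x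
        · have hall' : ∀ x ∈ b :: bt, a ≤ x := by
            intro x hx
            rcases List.mem_cons.mp hx with h | h
            · omega
            · exact hall.2 x h
          rw [if_pos hall, gB_stop _ a 1 hall']
        · rw [if_neg hall]
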